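-- pv_equiv track=rewrite | github.com/vitalymil/poker-simulator | pokersimulator/pokerdeck/pockerdeck.py | __pair_score
-- ===== SOURCE A (Python) =====
-- def __pair_score(hand, pairs):
--     res = 0
--     high_count = 0
--     for i in range(len(hand)):
--         if pairs[i]:
--             res += (16**5) * hand[i]['rank']
--         elif i > 0 and pairs[i - 1]:
--             pass
--         else:
--             res += (16**(high_count + 2)) * hand[i]['rank']
--             high_count += 1
--     return res
-- ===== SOURCE B (Python) =====
-- def __pair_score(hand, pairs):
--     ps = hh = 0
--     for card, p, prev in reversed(list(zip(hand, pairs, [False] + list(pairs)))):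
--         if p:
--             ps += card['rank']
--         elif not prev:
--             hh = card['rank'] + 16 * hh
--     return 16 ** 5 * ps + 16 ** 2 * hh
-- ===== Notes on version B (the rewrite author's own statement) =====
-- stated objective: alternative
-- what changed: Replaces the forward stateful loop with its high_count exponent counter by a single backward pass over zip(hand, pairs, [False]+pairs) that accumulates the high-card part as a Horner scheme (hh = rank + 16*hh), so no exponent counter and no index bookkeeping exist.
import Mathlib
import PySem

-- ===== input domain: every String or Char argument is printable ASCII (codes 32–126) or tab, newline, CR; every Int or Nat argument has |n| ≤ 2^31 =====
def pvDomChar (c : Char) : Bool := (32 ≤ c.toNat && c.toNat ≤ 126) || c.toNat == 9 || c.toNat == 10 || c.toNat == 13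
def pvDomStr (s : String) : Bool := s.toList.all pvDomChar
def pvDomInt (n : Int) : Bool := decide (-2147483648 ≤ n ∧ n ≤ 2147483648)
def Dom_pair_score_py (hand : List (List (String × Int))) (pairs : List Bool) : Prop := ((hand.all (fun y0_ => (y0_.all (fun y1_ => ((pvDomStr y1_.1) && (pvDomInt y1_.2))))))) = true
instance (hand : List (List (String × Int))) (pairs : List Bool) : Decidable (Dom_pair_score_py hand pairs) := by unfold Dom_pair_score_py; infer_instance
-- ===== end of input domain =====

-- B replaces A's forward stateful loop with its high_count exponent counter by a single
-- backward pass over zip(hand, pairs, [False]+pairs) that accumulates the high-card part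
-- as a Horner scheme (hh = rank + 16*hh); objective: alternative decomposition.

-- shared helper: hand[i]['rank'] — first-match lookup in the association list (Python dict lookup)
def pvRank (card : List (String × Int)) : Int :=
  (((card.find? (fun p => p.1 == "rank")).map (fun p => p.2)).getD 0)

-- ===== PORT A =====
def pair_score_py (hand : List (List (String × Int))) (pairs : List Bool) : Int :=
  ((List.range hand.length).foldl (fun (st : Int × Nat) i =>
      if pairs.getD i false then
        (st.1 + 16 ^ 5 * pvRank (hand.getD i []), st.2)
      else if 0 < i ∧ pairs.getD (i - 1) false then
        st
      else
        (st.1 + 16 ^ (st.2 + 2) * pvRank (hand.getD i []), st.2 + 1))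
    (0, 0)).1

-- ===== PORT B =====
-- reversed(list(zip(hand, pairs, [False]+pairs))) processed with a Horner accumulator = foldr
def pair_score_py_alt (hand : List (List (String × Int))) (pairs : List Bool) : Int :=
  let trip := hand.zip (pairs.zip (false :: pairs))
  let r := trip.foldr
    (fun (cp : List (String × Int) × Bool × Bool) (st : Int × Int) =>
      if cp.2.1 then (st.1 + pvRank cp.1, st.2)
      else if cp.2.2 then st
      else (st.1, pvRank cp.1 + 16 * st.2)) (0, 0)
  16 ^ 5 * r.1 + 16 ^ 2 * r.2

-- ===== PRECONDITION & SPEC =====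
-- Pre_ excludes exactly the crashes: pairs shorter than hand (IndexError on pairs[i]) and a card
-- whose 'rank' key is actually read but missing (KeyError); cards only reached by the skip branch
-- need no 'rank' key, so Pre_ admits every input on which A returns.
def Pre_pair_score_py (hand : List (List (String × Int))) (pairs : List Bool) : Prop :=
  hand.length ≤ pairs.length ∧
  ∀ i, i < hand.length →
    (pairs.getD i false = true ∨ ¬(0 < i ∧ pairs.getD (i - 1) false = true)) →
    ((hand.getD i []).find? (fun p => p.1 == "rank")).isSome = true
instance (hand : List (List (String × Int))) (pairs : List Bool) : Decidable (Pre_pair_score_py hand pairs) := by unfold Pre_pair_score_py; infer_instance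

def pvWitness_pair_score_py : (List (List (String × Int))) × List Bool :=
  ([[("rank", 5)], [("rank", 7)], [("rank", 3)]], [true, true, false])

def Spec_pair_score_py (hand : List (List (String × Int))) (pairs : List Bool) (out : Int) : Prop := out = pair_score_py_alt hand pairs
instance (hand : List (List (String × Int))) (pairs : List Bool) (out : Int) : Decidable (Spec_pair_score_py hand pairs out) := by unfold Spec_pair_score_py; infer_instance

-- ===== CLAIM (what is proved, stated in full; the proofs are below) =====
def Claim_equal_pair_score_py : Prop := ∀ (hand : List (List (String × Int))) (pairs : List Bool), Dom_pair_score_py hand pairs → Pre_pair_score_py hand pairs → Spec_pair_score_py hand pairs (pair_score_py hand pairs)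

-- ===== LEMMAS AND PROOFS =====

-- B's backward Horner pass, named for the proofs
def pvBack (l : List (List (String × Int) × Bool × Bool)) : Int × Int :=
  l.foldr
    (fun (cp : List (String × Int) × Bool × Bool) (st : Int × Int) =>
      if cp.2.1 then (st.1 + pvRank cp.1, st.2)
      else if cp.2.2 then st
      else (st.1, pvRank cp.1 + 16 * st.2)) (0, 0)

-- key lemma: A's fold over the index range [k, k+m) equals B's backward pass over the
-- corresponding suffix of the triple list, with the Horner part weighted by 16^(hc+2)
lemma pvKey (hand : List (List (String × Int))) (pairs : List Bool) :
    ∀ (m k : Nat) (st : Int × Nat), k + m = hand.length → hand.length ≤ pairs.length →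
    (((List.range m).map (· + k)).foldl (fun (st : Int × Nat) i =>
        if pairs.getD i false then
          (st.1 + 16 ^ 5 * pvRank (hand.getD i []), st.2)
        else if 0 < i ∧ pairs.getD (i - 1) false then
          st
        else
          (st.1 + 16 ^ (st.2 + 2) * pvRank (hand.getD i []), st.2 + 1)) st).1
      = st.1
        + 16 ^ 5 * (pvBack ((hand.drop k).zip ((pairs.drop k).zip ((false :: pairs).drop k)))).1
        + 16 ^ (st.2 + 2) * (pvBack ((hand.drop k).zip ((pairs.drop k).zip ((false :: pairs).drop k)))).2 := by
  intro m
  induction m with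
  | zero =>
    intro k st hk _
    have : hand.drop k = [] := by
      apply List.drop_eq_nil_of_le; omega
    simp [this, pvBack]
  | succ m ih =>
    intro k st hk hlen
    have hkh : k < hand.length := by omega
    have hkp : k < pairs.length := by omega
    have hrange : (List.range (m + 1)).map (· + k) = k :: (List.range m).map (· + (k + 1)) := by
      rw [List.range_succ_eq_map, List.map_cons, List.map_map]
      have : ((fun x => x + k) ∘ Nat.succ) = (fun x => x + (k + 1)) := by
        funext x; simp only [Function.comp_apply]; omega
      rw [this]; simp
    have hgh : hand.getD k [] = hand[k] := List.getD_eq_getElem hand [] hkh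
    have hgp : pairs.getD k false = pairs[k] := List.getD_eq_getElem pairs false hkp
    have hz : (hand.drop k).zip ((pairs.drop k).zip ((false :: pairs).drop k))
        = (hand[k], pairs[k], (false :: pairs)[k]'(by simp; omega))
            :: (hand.drop (k + 1)).zip ((pairs.drop (k + 1)).zip ((false :: pairs).drop (k + 1))) := by
      rw [List.drop_eq_getElem_cons hkh, List.drop_eq_getElem_cons hkp,
        List.drop_eq_getElem_cons (l := false :: pairs) (by simp; omega), List.zip_cons_cons,
        List.zip_cons_cons]
    have hpb : pvBack ((hand.drop k).zip ((pairs.drop k).zip ((false :: pairs).drop k)))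
        = (if pairs[k] then
            ((pvBack ((hand.drop (k + 1)).zip ((pairs.drop (k + 1)).zip ((false :: pairs).drop (k + 1))))).1 + pvRank hand[k],
             (pvBack ((hand.drop (k + 1)).zip ((pairs.drop (k + 1)).zip ((false :: pairs).drop (k + 1))))).2)
          else if (false :: pairs)[k]'(by simp; omega) then
            pvBack ((hand.drop (k + 1)).zip ((pairs.drop (k + 1)).zip ((false :: pairs).drop (k + 1))))
          else
            ((pvBack ((hand.drop (k + 1)).zip ((pairs.drop (k + 1)).zip ((false :: pairs).drop (k + 1))))).1,
             pvRank hand[k] + 16 * (pvBack ((hand.drop (k + 1)).zip ((pairs.drop (k + 1)).zip ((false :: pairs).drop (k + 1))))).2)) := by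
      rw [hz]; rfl
    have hprev : ((false :: pairs)[k]'(by simp; omega) = true)
        ↔ (0 < k ∧ pairs.getD (k - 1) false = true) := by
      cases k with
      | zero => simp
      | succ k' =>
        have hk' : k' < pairs.length := by omega
        simp [List.getElem?_eq_getElem hk']
    rw [hrange, List.foldl_cons, hpb, ih (k + 1) _ (by omega) hlen]
    simp only [hgp, hgh]
    by_cases hp : pairs[k] = true
    · simp only [hp, if_true]
      ring
    · have hp' : pairs[k] = false := by simpa using hp
      simp only [hp', Bool.false_eq_true, if_false]
      by_cases hq : (false :: pairs)[k]'(by simp; omega) = true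
      · rw [if_pos (hprev.mp hq)]
        simp only [hq, if_true]
      · have hq' : (false :: pairs)[k]'(by simp; omega) = false := by simpa using hq
        rw [if_neg (fun h => hq (hprev.mpr h))]
        simp only [hq', Bool.false_eq_true, if_false]
        ring

-- ===== VERDICT (by name: the statement is the Claim_ definition above) =====
theorem pair_score_py_spec : Claim_equal_pair_score_py := by
  intro hand pairs _ hpre
  unfold Spec_pair_score_py pair_score_py pair_score_py_alt
  have h := pvKey hand pairs hand.length 0 (0, 0) (by omega) hpre.1
  simp only [List.drop_zero] at h
  have hmap : (List.range hand.length).map (· + 0) = List.range hand.length := by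
    simp
  rw [hmap] at h
  rw [h, pvBack]
  norm_num
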